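/-
  THE CONTRACTS OF THE STUB ALLOCATOR of proofs.vorbis/c/libc.c: `malloc` returns NULL, `free` does nothing. They exist only to
  link stb_vorbis' no-arena path, which is dead. NOT PART OF THE BASE IMAGE: a program with a real heap links c/base/heap.c, whose
  contracts are Asan/Heap.lean's (the slot of agent GA). Kept here because stb_vorbis' statements cite them; in the namespace `ProgX.Spec.Stub`, because `ProgX.Spec.malloc.spec` /
  `free.spec` are the REAL heap's contracts (ProgX/Spec/Heap.lean): two definitions of one name could never be imported together.
-/
import ProgX.Spec.Basic
namespace ProgX.Spec.Stub
open X86 X86.User Asan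

/-- **`malloc(rdi = size)`** (CONTRACTS 36): any argument. `mov eax, 0 ; ret`: returns NULL (the 32-bit move zero-extends:
rax = 0). It exists only to link the decoder's no-arena path, which is dead (the driver always passes an arena). No memory
access but the `ret`'s, no stack frame; no shadow byte is written. -/
def malloc.spec (T : Text) (others : List Obj) (frames : List (Nat × FrameLayout)) : Spec where
  pre u :=
    ShadowPre T others frames u
  post u v :=
    v.reg .rax = 0 ∧
    ShadowUntouched u.mem v.mem
  frame := 0
  writes _ := []

@[vspec] theorem malloc.spec_frame (T : Text) (others : List Obj) (frames : List (Nat × FrameLayout)) :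
    (malloc.spec T others frames).frame = 0 := id rfl

@[vspec] theorem malloc.spec_writes (T : Text) (others : List Obj) (frames : List (Nat × FrameLayout)) (u : State) :
    (malloc.spec T others frames).writes u = [] := id rfl

/-- **`free(rdi = p)`** (CONTRACTS 10): any argument. One instruction, `ret`: nothing happens (dead, as `malloc`). No stack
frame; no shadow byte is written. -/
def free.spec (T : Text) (others : List Obj) (frames : List (Nat × FrameLayout)) : Spec where
  pre u :=
    ShadowPre T others frames u
  post u v :=
    ShadowUntouched u.mem v.mem
  frame := 0
  writes _ := []

@[vspec] theorem free.spec_frame (T : Text) (others : List Obj) (frames : List (Nat × FrameLayout)) :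
    (free.spec T others frames).frame = 0 := id rfl

@[vspec] theorem free.spec_writes (T : Text) (others : List Obj) (frames : List (Nat × FrameLayout)) (u : State) :
    (free.spec T others frames).writes u = [] := id rfl

end ProgX.Spec.Stub
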